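-- pv_equiv track=rewrite | github.com/HenrikSydow/PasswordGameQt | src/pwd_rules/rules/rule_upper_lower_alternating.py | check
-- ===== SOURCE A (Python) =====
-- def check(password: str) -> bool:
--     last_char: str = ""
--     for c in password:
--         if last_char:
--             if (
--                 (last_char.isupper() and c.isupper()) or
--                 (last_char.islower() and c.islower())
--             ):
--                 return False
--         last_char = c
--     return True
-- ===== SOURCE B (Python) =====
-- def _cls(c):
--     return "U" if c.isupper() else ("L" if c.islower() else c)
--
-- def check(password: str) -> bool:
--     # Run-length grouping: collect the maximal runs of equal case-labels,
--     # then require every letter-labelled run to have length exactly 1.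
--     runs = []  # list of [label, count]
--     for c in password:
--         k = _cls(c)
--         if runs and runs[-1][0] == k:
--             runs[-1][1] += 1
--         else:
--             runs.append([k, 1])
--     return all(n == 1 for k, n in runs if k in ("U", "L"))
-- ===== Notes on version B (the rewrite author's own statement) =====
-- stated objective: alternative
-- what changed: Replaces the last_char state machine with early return by a run-length grouping pass over case-labels (U/L/self), accepting iff every letter-labelled run has length exactly 1.
import Mathlib
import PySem

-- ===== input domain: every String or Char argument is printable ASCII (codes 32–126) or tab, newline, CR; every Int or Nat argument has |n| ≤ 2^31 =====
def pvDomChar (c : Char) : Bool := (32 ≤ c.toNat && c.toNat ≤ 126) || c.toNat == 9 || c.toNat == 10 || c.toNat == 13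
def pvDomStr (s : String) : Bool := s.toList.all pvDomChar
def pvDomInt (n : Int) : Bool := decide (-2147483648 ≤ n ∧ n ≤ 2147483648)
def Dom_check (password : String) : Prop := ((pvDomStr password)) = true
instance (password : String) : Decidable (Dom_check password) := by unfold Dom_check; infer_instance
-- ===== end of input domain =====

-- ===== PORT A =====
-- B replaces A's last_char adjacent-pair state machine by run-length grouping
-- over case-labels; equal algorithmic cost (objective: alternative).

-- Python: single-char last_char "" → none; the loop with early return.
def checkGo : Option Char → List Char → Bool
  | _, [] => true
  | none, c :: cs => checkGo (some c) cs
  | some p, c :: cs =>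
      if (PySem.Chars.isupper p && PySem.Chars.isupper c)
          || (PySem.Chars.islower p && PySem.Chars.islower c) then false
      else checkGo (some c) cs

def check (password : String) : Bool := checkGo none password.toList

-- ===== PORT B =====
def clsB (c : Char) : Char :=
  if PySem.Chars.isupper c then 'U' else if PySem.Chars.islower c then 'L' else c

-- one loop step of Source B: merge into the last run or append a new one.
-- The accumulator keeps the runs most-recent-first (Python's runs[-1] is the
-- head here); it is reversed at the end to recover Python's runs list.
def altStep (runs : List (Char × Int)) (c : Char) : List (Char × Int) :=
  let k := clsB c
  match runs with
  | (k', n) :: rest => if k' == k then (k', n + 1) :: rest else (k, 1) :: (k', n) :: rest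
  | [] => [(k, 1)]

def check_alt (password : String) : Bool :=
  (((password.toList.foldl altStep []).reverse).filter
      (fun p => p.1 == 'U' || p.1 == 'L')).all (fun p => p.2 == 1)

-- ===== PRECONDITION & SPEC =====
def Spec_check (password : String) (out : Bool) : Prop := out = check_alt password
instance (password : String) (out : Bool) : Decidable (Spec_check password out) := by unfold Spec_check; infer_instance

-- ===== CLAIM (what is proved, stated in full; the proofs are below) =====
def Claim_equal_check : Prop := ∀ (password : String), Dom_check password → Spec_check password (check password)

-- ===== LEMMAS AND PROOFS =====

def finalAll (runs : List (Char × Int)) : Bool :=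
  (runs.filter (fun p => p.1 == 'U' || p.1 == 'L')).all (fun p => p.2 == 1)

def goodRun (p : Char × Int) : Prop := (p.1 = 'U' ∨ p.1 = 'L') → p.2 = 1

def badRun (p : Char × Int) : Prop := (p.1 = 'U' ∨ p.1 = 'L') ∧ 2 ≤ p.2

lemma upper_not_lower {c : Char} (h : PySem.Chars.isupper c = true) :
    PySem.Chars.islower c = false := by
  simp [PySem.Chars.isupper, PySem.Chars.islower, Char.le_def,
    UInt32.le_iff_toNat_le] at *
  omega

lemma not_upper_ne_U {c : Char} (h : PySem.Chars.isupper c = false) : c ≠ 'U' := by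
  rintro rfl; exact absurd h (by decide)

lemma not_upper_ne_U' {c : Char} (h : PySem.Chars.isupper c = false) : 'U' ≠ c :=
  (not_upper_ne_U h).symm

-- 'L' itself is an upper-case letter, so a non-upper char cannot be 'L'
lemma not_upper_ne_L {c : Char} (h : PySem.Chars.isupper c = false) : c ≠ 'L' := by
  rintro rfl; exact absurd h (by decide)

lemma not_upper_ne_L' {c : Char} (h : PySem.Chars.isupper c = false) : 'L' ≠ c :=
  (not_upper_ne_L h).symm

-- A's pair condition, expressed through B's labels
lemma cond_eq (p c : Char) :
    ((PySem.Chars.isupper p && PySem.Chars.isupper c)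
      || (PySem.Chars.islower p && PySem.Chars.islower c))
    = (decide (clsB p = clsB c) && decide (clsB p = 'U' ∨ clsB p = 'L')) := by
  unfold clsB
  rcases hpu : PySem.Chars.isupper p with _ | _ <;>
    rcases hcu : PySem.Chars.isupper c with _ | _ <;>
      rcases hpl : PySem.Chars.islower p with _ | _ <;>
        rcases hcl : PySem.Chars.islower c with _ | _ <;>
    simp_all [upper_not_lower, not_upper_ne_U (c := p), not_upper_ne_U' (c := c),
      not_upper_ne_L (c := p), not_upper_ne_L' (c := c)]

lemma finalAll_of_bad (runs : List (Char × Int)) (hq : ∃ q ∈ runs, badRun q) :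
    finalAll runs = false := by
  obtain ⟨q, hmem, hk, hn⟩ := hq
  unfold finalAll
  simp only [List.all_eq_false]
  refine ⟨q, List.mem_filter.mpr ⟨hmem, ?_⟩, ?_⟩
  · rcases hk with h | h <;> simp [h]
  · simp; omega

lemma bad_foldl (cs : List Char) (runs : List (Char × Int))
    (hq : ∃ q ∈ runs, badRun q) :
    ∃ q ∈ cs.foldl altStep runs, badRun q := by
  induction cs generalizing runs with
  | nil => exact hq
  | cons c cs ih =>
      refine ih _ ?_
      obtain ⟨q, hmem, hb⟩ := hq
      unfold altStep
      match runs, hmem with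
      | (k', n) :: rest, hmem =>
        dsimp only
        split
        · rcases List.mem_cons.mp hmem with rfl | h
          · exact ⟨(k', n + 1), List.mem_cons_self, hb.1, by have := hb.2; omega⟩
          · exact ⟨q, List.mem_cons_of_mem _ h, hb⟩
        · exact ⟨q, List.mem_cons_of_mem _ hmem, hb⟩

-- main invariant: with the front run labelled clsB p (good so far) and all completed
-- runs good, the fold agrees with A's scan from prev = p
lemma main_inv (cs : List Char) (p : Char) (n : Int) (rest : List (Char × Int))
    (hgood : (clsB p = 'U' ∨ clsB p = 'L') → n = 1)
    (hrest : ∀ q ∈ rest, goodRun q) :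
    finalAll (cs.foldl altStep ((clsB p, n) :: rest)) = checkGo (some p) cs := by
  induction cs generalizing p n rest with
  | nil =>
      simp only [List.foldl_nil, checkGo, finalAll]
      rw [List.all_eq_true]
      intro q hq
      rcases List.mem_filter.mp hq with ⟨hmem, hlab⟩
      have hUL : (q.1 = 'U' ∨ q.1 = 'L') := by
        rcases Bool.or_eq_true_iff.mp hlab with h | h
        · exact Or.inl (by simpa using h)
        · exact Or.inr (by simpa using h)
      rcases List.mem_cons.mp hmem with rfl | h
      · simp [hgood hUL]
      · simp [hrest q h hUL]
  | cons c cs ih =>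
      simp only [List.foldl_cons, checkGo, cond_eq]
      by_cases heq : clsB p = clsB c
      · by_cases hlet : clsB p = 'U' ∨ clsB p = 'L'
        · -- A returns False; B's front run becomes bad and stays bad
          have hb : ∃ q ∈ cs.foldl altStep (altStep ((clsB p, n) :: rest) c), badRun q := by
            refine bad_foldl cs _ ⟨(clsB p, n + 1), ?_, hlet, ?_⟩
            · simp [altStep, heq]
            · have := hgood hlet; omega
          rw [finalAll_of_bad _ hb]
          have hc : (decide (clsB p = clsB c) && decide (clsB p = 'U' ∨ clsB p = 'L')) = true := by
            simp [heq]; exact heq ▸ hlet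
          rw [hc]; simp
        · -- equal non-letter labels: run merges, A just advances
          have hstep : altStep ((clsB p, n) :: rest) c = (clsB c, n + 1) :: rest := by
            simp [altStep, heq]
          rw [hstep, ih c (n + 1) rest (fun h => absurd (heq ▸ h) hlet) hrest]
          have hc : (decide (clsB p = clsB c) && decide (clsB p = 'U' ∨ clsB p = 'L')) = false := by
            simp [hlet]
          rw [hc]; simp
      · -- different label: a fresh run of length 1 is started
        have hstep : altStep ((clsB p, n) :: rest) c
            = (clsB c, 1) :: (clsB p, n) :: rest := by
          simp only [altStep]
          rw [if_neg (by simpa using heq)]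
        rw [hstep, ih c 1 ((clsB p, n) :: rest) (fun _ => rfl)
          (by intro q hq
              rcases List.mem_cons.mp hq with rfl | h
              · exact fun h => hgood h
              · exact hrest q h)]
        have hc : (decide (clsB p = clsB c) && decide (clsB p = 'U' ∨ clsB p = 'L')) = false := by
          simp [heq]
        rw [hc]; simp

-- ===== VERDICT (by name: the statement is the Claim_ definition above) =====
theorem check_spec : Claim_equal_check := by
  intro password _
  unfold Spec_check check check_alt
  simp only [List.filter_reverse, List.all_reverse]
  cases h : password.toList with
  | nil => simp [checkGo]
  | cons c cs =>
      simp only [checkGo, List.foldl_cons]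
      have hstep : altStep [] c = [(clsB c, 1)] := rfl
      rw [hstep]
      exact (main_inv cs c 1 [] (fun _ => rfl) (by intro q hq; cases hq)).symm
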